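-- pv_equiv track=rewrite | github.com/aisspr/leetcode | GCA/q1.py | sortByHeight
-- ===== SOURCE A (Python) =====
-- def sortByHeight(arr):
--     temp = sorted([el for el in arr if el != -1])
--     j = 0
--     for i in range(len(arr)):
--         if arr[i] != -1:
--            arr[i] = temp[j]
--            j+= 1
--     return arr
-- ===== SOURCE B (Python) =====
-- def sortByHeight(arr):
--     # Hand-written binary-insertion sort of the non -1 values (no library sort),
--     # then a rebuild pass that destructively pops the smallest remaining value;
--     # arr is mutated in place via arr[:] and returned, like A.
--     rest = []
--     for v in arr:
--         if v != -1:
--             lo, hi = 0, len(rest)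
--             while lo < hi:
--                 mid = (lo + hi) // 2
--                 if rest[mid] <= v:
--                     lo = mid + 1
--                 else:
--                     hi = mid
--             rest.insert(lo, v)
--     out = []
--     for v in arr:
--         if v == -1:
--             out.append(-1)
--         else:
--             out.append(rest.pop(0))
--     arr[:] = out
--     return arr
-- ===== Notes on version B (the rewrite author's own statement) =====
-- stated objective: alternative
-- what changed: B replaces A's library sort plus guarded index loop with a j-counter by a hand-written binary-insertion sort of the non -1 values and a rebuild pass that destructively pops the smallest remaining value; no indexing into the result and no counter remain (in-place mutation via arr[:] is preserved).
import Mathlib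
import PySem

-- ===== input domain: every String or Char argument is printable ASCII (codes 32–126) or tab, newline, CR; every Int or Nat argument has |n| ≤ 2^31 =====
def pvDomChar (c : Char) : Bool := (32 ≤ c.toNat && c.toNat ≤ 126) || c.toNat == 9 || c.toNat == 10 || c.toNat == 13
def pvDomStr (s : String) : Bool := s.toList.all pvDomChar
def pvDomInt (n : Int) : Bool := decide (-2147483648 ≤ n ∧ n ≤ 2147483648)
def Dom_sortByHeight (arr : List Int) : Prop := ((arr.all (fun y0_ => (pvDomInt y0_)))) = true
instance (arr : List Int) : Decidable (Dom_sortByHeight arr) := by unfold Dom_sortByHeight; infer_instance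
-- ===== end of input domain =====

-- B replaces A's library sort + guarded index loop with a counter by a hand-written
-- binary-insertion sort of the non -1 values and a rebuild pass that destructively pops
-- the smallest remaining value; same return value. Both Pythons mutate arr in place; the
-- theorems here are about the (identical) returned value.

-- ===== PORT A =====
-- indices of the loop are always in range and j never exceeds temp's length, so the
-- total forms pyGetD/pySetD are exact here
def sortByHeight (arr : List Int) : List Int :=
  let temp := PySem.List.sorted (arr.filter (fun el => el != -1)) (fun x => x)
  let res := (PySem.List.pyRange 0 (PySem.List.len arr) 1).foldl
    (fun (s : List Int × Int) i =>
      if PySem.List.pyGetD s.1 i 0 ≠ -1 then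
        (PySem.List.pySetD s.1 i (PySem.List.pyGetD temp s.2 0), s.2 + 1)
      else s)
    (arr, 0)
  res.1

-- ===== PORT B =====
-- Source B's while loop computing the binary-search insertion point; rest[mid] is always in
-- range (lo < hi ≤ len(rest) at every call the whole function makes), so pyGetD is exact
def pvBisect (rest : List Int) (v : Int) (lo hi : Int) : Int :=
  if lo < hi then
    let mid := PySem.Int.floordiv (lo + hi) 2
    if PySem.List.pyGetD rest mid 0 ≤ v then pvBisect rest v (mid + 1) hi
    else pvBisect rest v lo mid
  else lo
termination_by (hi - lo).toNat
decreasing_by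
  · have h1 : lo ≤ PySem.Int.floordiv (lo + hi) 2 :=
      (PySem.Int.le_floordiv_iff_mul_le (by omega)).mpr (by omega)
    have h2 : PySem.Int.floordiv (lo + hi) 2 < hi :=
      (PySem.Int.floordiv_lt_iff_lt_mul (by omega)).mpr (by omega)
    omega
  · have h2 : PySem.Int.floordiv (lo + hi) 2 < hi :=
      (PySem.Int.floordiv_lt_iff_lt_mul (by omega)).mpr (by omega)
    omega

-- the body of Source B's first loop: binary search, then rest.insert(lo, v)
def pvPlace (rest : List Int) (v : Int) : List Int :=
  PySem.List.insert rest (pvBisect rest v 0 (PySem.List.len rest)) v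

-- Source B's second loop; rest.pop(0) is always on a nonempty list over the whole function
-- (|rest| = number of non -1 entries left), so headD/tail are exact
def sortByHeight_alt (arr : List Int) : List Int :=
  let rest := arr.foldl (fun rest v => if v != -1 then pvPlace rest v else rest) []
  let out := arr.foldl
    (fun (s : List Int × List Int) v =>
      if v = -1 then (s.1 ++ [-1], s.2) else (s.1 ++ [s.2.headD 0], s.2.tail))
    ([], rest)
  out.1

-- ===== PRECONDITION & SPEC =====
def Spec_sortByHeight (arr : List Int) (out : List Int) : Prop := out = sortByHeight_alt arr
instance (arr : List Int) (out : List Int) : Decidable (Spec_sortByHeight arr out) := by unfold Spec_sortByHeight; infer_instance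

-- ===== CLAIM (what is proved, stated in full; the proofs are below) =====
def Claim_equal_sortByHeight : Prop := ∀ (arr : List Int), Dom_sortByHeight arr → Spec_sortByHeight arr (sortByHeight arr)

-- ===== LEMMAS AND PROOFS =====

-- the meeting point of the two proofs: rebuild `todo` consuming `vals` front-to-back
def pvRebuild : List Int → List Int → List Int
  | [], _ => []
  | x :: xs, vals =>
      if x = -1 then -1 :: pvRebuild xs vals
      else vals.headD 0 :: pvRebuild xs vals.tail

lemma pvSet_append_mid (done rest : List Int) (v x : Int) :
    (done ++ v :: rest).set done.length x = done ++ x :: rest := by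
  induction done with
  | nil => simp
  | cons d ds ih => simp [ih]

-- A's loop, over any split done ++ todo with j values already consumed, produces
-- done ++ the rebuild of todo from the remaining sorted values
lemma pvLoop_spec (temp : List Int) :
    ∀ (todo done : List Int) (j : Nat),
    ((PySem.List.pyRange (done.length : Int) ((done.length + todo.length : Nat) : Int) 1).foldl
      (fun (s : List Int × Int) i =>
        if PySem.List.pyGetD s.1 i 0 ≠ -1 then
          (PySem.List.pySetD s.1 i (PySem.List.pyGetD temp s.2 0), s.2 + 1)
        else s)
      (done ++ todo, (j : Int))).1
    = done ++ pvRebuild todo (temp.drop j) := by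
  intro todo
  induction todo with
  | nil => intro done j; simp [pvRebuild]
  | cons v rest ih =>
    intro done j
    rw [PySem.List.pyRange_one_cons (by push_cast [List.length_cons]; omega)]
    rw [List.foldl_cons]
    by_cases hv : v = -1
    · have hcond : ¬ (PySem.List.pyGetD (done ++ v :: rest) (done.length : Int) 0 ≠ -1) := by
        simp [PySem.List.pyGetD_natCast, hv]
      rw [if_neg hcond]
      have h1 : ((done.length : Int) + 1) = (((done ++ [v]).length : Nat) : Int) := by simp
      have h2 : (done.length + (v :: rest).length : Nat)
          = ((done ++ [v]).length + rest.length : Nat) := by simp; omega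
      rw [h1, h2, show done ++ v :: rest = (done ++ [v]) ++ rest by simp,
        ih (done ++ [v]) j]
      simp [pvRebuild, hv]
    · have hcond : (PySem.List.pyGetD (done ++ v :: rest) (done.length : Int) 0 ≠ -1) := by
        simp [PySem.List.pyGetD_natCast, hv]
      rw [if_pos hcond]
      have hset : PySem.List.pySetD (done ++ v :: rest) (done.length : Int)
          (PySem.List.pyGetD temp (j : Int) 0)
          = (done ++ [temp.getD j 0]) ++ rest := by
        rw [PySem.List.pyGetD_natCast, PySem.List.pySetD_natCast, pvSet_append_mid]
        simp
      have h1 : ((done.length : Int) + 1) = (((done ++ [temp.getD j 0]).length : Nat) : Int) := by simp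
      have h2 : (done.length + (v :: rest).length : Nat)
          = ((done ++ [temp.getD j 0]).length + rest.length : Nat) := by simp; omega
      have hj : ((j : Int) + 1) = ((j + 1 : Nat) : Int) := by push_cast; ring
      rw [hset, hj, h1, h2, ih (done ++ [temp.getD j 0]) (j + 1)]
      simp [pvRebuild, hv, List.head?_drop, List.getD_eq_getElem?_getD, List.tail_drop]

-- in a sorted list, an element is ≤ v exactly when its index is below count of (≤ v)
lemma pvCount_char (v : Int) :
    ∀ (rest : List Int), rest.Pairwise (· ≤ ·) →
      ∀ i (h : i < rest.length),
        (rest[i] ≤ v ↔ i < rest.countP (fun x => decide (x ≤ v))) := by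
  intro rest
  induction rest with
  | nil => intro _ i h; simp at h
  | cons x xs ih =>
    intro hp i h
    rcases List.pairwise_cons.mp hp with ⟨hx, hxs⟩
    by_cases hxv : x ≤ v
    · have hc : (x :: xs).countP (fun x => decide (x ≤ v))
          = xs.countP (fun x => decide (x ≤ v)) + 1 := by
        simp [hxv]
      cases i with
      | zero => simpa [hc] using hxv
      | succ i =>
        have h' : i < xs.length := by simpa using h
        simpa [hc] using ih hxs i h'
    · have hzero : xs.countP (fun x => decide (x ≤ v)) = 0 := by
        rw [List.countP_eq_zero]
        intro y hy
        have : x ≤ y := hx y hy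
        simp; omega
      have hc : (x :: xs).countP (fun x => decide (x ≤ v)) = 0 := by
        simp [hxv, hzero]
      cases i with
      | zero => simp [hc, hxv]
      | succ i =>
        have h' : i < xs.length := by simpa using h
        have : ¬ xs[i] ≤ v := by
          have := hx xs[i] (List.getElem_mem h')
          omega
        simp [hc, this]

-- the binary search returns the count of (≤ v) whenever it brackets it
lemma pvBisect_eq (rest : List Int) (v : Int) (hp : rest.Pairwise (· ≤ ·)) :
    ∀ (n : Nat) (lo hi : Int), (hi - lo).toNat = n → 0 ≤ lo →
      lo ≤ (rest.countP (fun x => decide (x ≤ v)) : Int) →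
      (rest.countP (fun x => decide (x ≤ v)) : Int) ≤ hi →
      hi ≤ (rest.length : Int) →
      pvBisect rest v lo hi = (rest.countP (fun x => decide (x ≤ v)) : Int) := by
  intro n
  induction n using Nat.strong_induction_on with
  | _ n ihn =>
    intro lo hi hn h0 hlo hhi hlen
    rw [pvBisect]
    by_cases hlt : lo < hi
    · rw [if_pos hlt]
      have h1 : lo ≤ PySem.Int.floordiv (lo + hi) 2 :=
        (PySem.Int.le_floordiv_iff_mul_le (by omega)).mpr (by omega)
      have h2 : PySem.Int.floordiv (lo + hi) 2 < hi :=
        (PySem.Int.floordiv_lt_iff_lt_mul (by omega)).mpr (by omega)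
      set mid := PySem.Int.floordiv (lo + hi) 2 with hmid
      obtain ⟨m, hm⟩ : ∃ m : Nat, mid = (m : Int) := ⟨mid.toNat, by omega⟩
      have hmlen : m < rest.length := by omega
      have hget : PySem.List.pyGetD rest mid 0 = rest[m] := by
        rw [hm, PySem.List.pyGetD_natCast]
        simp [List.getD_eq_getElem?_getD, List.getElem?_eq_getElem hmlen]
      have hchar := pvCount_char v rest hp m hmlen
      by_cases hcmp : PySem.List.pyGetD rest mid 0 ≤ v
      · rw [if_pos hcmp]
        have : m < rest.countP (fun x => decide (x ≤ v)) := by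
          exact hchar.mp (by rwa [hget] at hcmp)
        exact ihn (hi - (mid + 1)).toNat (by omega) (mid + 1) hi rfl (by omega)
          (by omega) hhi hlen
      · rw [if_neg hcmp]
        have : ¬ m < rest.countP (fun x => decide (x ≤ v)) := by
          intro hcl
          exact hcmp (by rw [hget]; exact hchar.mpr hcl)
        exact ihn (mid - lo).toNat (by omega) lo mid rfl h0 hlo (by omega) (by omega)
    · rw [if_neg hlt]; omega

-- PySem.List.insert at an in-range natural index is take/cons/drop
lemma pvInsert_natCast (xs : List Int) (n : Nat) (v : Int) (h : n ≤ xs.length) :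
    PySem.List.insert xs (n : Int) v = xs.take n ++ v :: xs.drop n := by
  simp only [PySem.List.insert, PySem.List.sliceIndices]
  norm_num
  have hk : (if (n:Int) < 0 then max ((n:Int) + (xs.length:Int)) 0
      else min (n:Int) (xs.length:Int)).toNat = n := by
    rw [if_neg (by omega)]
    omega
  rw [hk]

-- placing v into a sorted rest keeps it sorted and is a cons up to permutation
lemma pvPlace_perm_pairwise (rest : List Int) (v : Int) (hp : rest.Pairwise (· ≤ ·)) :
    (pvPlace rest v).Perm (v :: rest) ∧ (pvPlace rest v).Pairwise (· ≤ ·) := by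
  have hc : rest.countP (fun x => decide (x ≤ v)) ≤ rest.length := List.countP_le_length
  set c := rest.countP (fun x => decide (x ≤ v)) with hcdef
  have hb : pvBisect rest v 0 (PySem.List.len rest) = (c : Int) := by
    rw [PySem.List.len_eq]
    exact pvBisect_eq rest v hp ((rest.length : Int) - 0).toNat 0 (rest.length : Int) rfl
      (by omega) (by omega) (by omega) (by omega)
  have hins : pvPlace rest v = rest.take c ++ v :: rest.drop c := by
    rw [pvPlace, hb, pvInsert_natCast rest c v hc]
  have hmemtake : ∀ a ∈ rest.take c, a ≤ v := by
    intro a ha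
    obtain ⟨i, hi, rfl⟩ := List.getElem_of_mem ha
    have hic : i < c := by simp [List.length_take] at hi; omega
    have hil : i < rest.length := by omega
    rw [List.getElem_take]
    exact (pvCount_char v rest hp i hil).mpr hic
  have hmemdrop : ∀ b ∈ rest.drop c, v ≤ b := by
    intro b hb'
    obtain ⟨i, hi, rfl⟩ := List.getElem_of_mem hb'
    have hil : c + i < rest.length := by simp [List.length_drop] at hi; omega
    rw [List.getElem_drop]
    have : ¬ rest[c + i] ≤ v := by
      intro hle
      have := (pvCount_char v rest hp (c + i) hil).mp hle
      omega
    omega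
  constructor
  · rw [hins]
    exact (List.perm_middle).trans (by rw [List.take_append_drop])
  · rw [hins]
    rw [List.pairwise_append]
    refine ⟨hp.sublist (List.take_sublist _ _), ?_, ?_⟩
    · rw [List.pairwise_cons]
      exact ⟨hmemdrop, hp.sublist (List.drop_sublist _ _)⟩
    · intro a ha b hb'
      rcases List.mem_cons.mp hb' with rfl | hb'
      · exact hmemtake a ha
      · exact le_trans (hmemtake a ha) (hmemdrop b hb')

-- the first loop of B builds a sorted permutation of acc ++ the non -1 values
lemma pvFold_place (xs : List Int) :
    ∀ acc : List Int, acc.Pairwise (· ≤ ·) →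
      ((xs.foldl (fun rest v => if v != -1 then pvPlace rest v else rest) acc).Perm
        (acc ++ xs.filter (fun v => v != -1))
      ∧ (xs.foldl (fun rest v => if v != -1 then pvPlace rest v else rest) acc).Pairwise (· ≤ ·)) := by
  induction xs with
  | nil => intro acc h; simp [h]
  | cons v xs ih =>
    intro acc h
    simp only [List.foldl_cons]
    by_cases hv : (v != -1) = true
    · rw [if_pos hv]
      obtain ⟨hperm, hsort⟩ := pvPlace_perm_pairwise acc v h
      obtain ⟨hp, hs⟩ := ih (pvPlace acc v) hsort
      refine ⟨hp.trans ?_, hs⟩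
      simp only [List.filter_cons, hv]
      exact (hperm.append_right _).trans
        (by simpa using (List.perm_middle (a := v) (l₁ := acc)
          (l₂ := xs.filter (fun v => v != -1))).symm)
    · rw [if_neg hv]
      obtain ⟨hp, hs⟩ := ih acc h
      refine ⟨hp.trans ?_, hs⟩
      simp only [List.filter_cons, hv]
      simp at hv
      simp
lemma pvRest_eq_sorted (arr : List Int) :
    arr.foldl (fun rest v => if v != -1 then pvPlace rest v else rest) []
      = PySem.List.sorted (arr.filter (fun el => el != -1)) (fun x => x) := by
  obtain ⟨hp, hs⟩ := pvFold_place arr [] (by simp)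
  have hp' : (arr.foldl (fun rest v => if v != -1 then pvPlace rest v else rest) []).Perm
      (arr.filter (fun el => el != -1)) := by simpa using hp
  exact (PySem.List.sorted_id_eq_of_perm_of_pairwise _ _ hp' hs).symm

-- the second loop of B is pvRebuild
lemma pvLoopB_eq_rebuild :
    ∀ (xs out rest : List Int),
      (xs.foldl
        (fun (s : List Int × List Int) v =>
          if v = -1 then (s.1 ++ [-1], s.2) else (s.1 ++ [s.2.headD 0], s.2.tail))
        (out, rest)).1
      = out ++ pvRebuild xs rest := by
  intro xs
  induction xs with
  | nil => intro out rest; simp [pvRebuild]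
  | cons v xs ih =>
    intro out rest
    simp only [List.foldl_cons]
    by_cases hv : v = -1
    · rw [if_pos hv, ih]
      simp [pvRebuild, hv]
    · rw [if_neg hv, ih]
      simp [pvRebuild, hv]

-- ===== VERDICT (by name: the statement is the Claim_ definition above) =====
theorem sortByHeight_spec : Claim_equal_sortByHeight := by
  intro arr _
  show sortByHeight arr = sortByHeight_alt arr
  unfold sortByHeight sortByHeight_alt
  rw [pvRest_eq_sorted, pvLoopB_eq_rebuild]
  have := pvLoop_spec (PySem.List.sorted (arr.filter (fun el => el != -1)) (fun x => x)) arr [] 0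
  simpa [PySem.List.len_eq] using this
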